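-- pv_equiv track=rewrite | github.com/i-krishna/Business-Analytics | LeetCode/HackerRank/exec_time_calc_prio_tasks.py | getTotalExecutionTime
-- ===== SOURCE A (Python) =====
-- def getTotalExecutionTime(n, logs):
--     # Write your code here
--     execution_times = [0] * n
--     stack = []
--
--     for i in range(len(logs)):
--         log = logs[i].split(":")
--         function_id, action, timestamp = int(log[0]), log[1], int(log[2])
--
--         if action == "start":
--             if stack:
--                 last_function_id, last_timestamp = stack[-1]
--                 execution_times[last_function_id] += timestamp - last_timestamp
--             stack.append((function_id, timestamp))
--         else:
--             last_function_id, last_timestamp = stack.pop()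
--             execution_times[last_function_id] += timestamp - last_timestamp + 1
--             if stack:
--                 stack[-1] = (stack[-1][0],  timestamp + 1)
--
--     return execution_times
-- ===== SOURCE B (Python) =====
-- def getTotalExecutionTime(n, logs):
--     # Recursive descent over the nested call structure: each balanced block
--     # contributes (inclusive duration) to its caller; a function's exclusive
--     # time is its inclusive duration minus its children's inclusive durations.
--     execution_times = [0] * n
--     events = [log.split(":") for log in logs]
--
--     def block(i):
--         # events[i] opens one call; charge its exclusive time and
--         # return (index just past its matching end, its inclusive duration)
--         fid, t0 = int(events[i][0]), int(events[i][2])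
--         i += 1
--         children = 0
--         while events[i][1] == "start":
--             i, inclusive = block(i)
--             children += inclusive
--         t1 = int(events[i][2])
--         execution_times[fid] += t1 - t0 + 1 - children
--         return i + 1, t1 - t0 + 1
--
--     i = 0
--     while i < len(events):
--         i, _ = block(i)
--     return execution_times
-- ===== Notes on version B (the rewrite author's own statement) =====
-- stated objective: alternative
-- what changed: B drops A's stack simulation (incremental segment charges and in-place top-timestamp rewrites) for recursive descent over the nested call structure, charging each function once with its block's inclusive duration minus its children's inclusive durations.
-- outside the precondition, e.g. on getTotalExecutionTime(1, ['0:start:0']): A returns [0], B raises IndexError; on getTotalExecutionTime(2, ['0:start:0', '1:start:2']): A returns [2, 0], B raises IndexError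
import Mathlib
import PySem

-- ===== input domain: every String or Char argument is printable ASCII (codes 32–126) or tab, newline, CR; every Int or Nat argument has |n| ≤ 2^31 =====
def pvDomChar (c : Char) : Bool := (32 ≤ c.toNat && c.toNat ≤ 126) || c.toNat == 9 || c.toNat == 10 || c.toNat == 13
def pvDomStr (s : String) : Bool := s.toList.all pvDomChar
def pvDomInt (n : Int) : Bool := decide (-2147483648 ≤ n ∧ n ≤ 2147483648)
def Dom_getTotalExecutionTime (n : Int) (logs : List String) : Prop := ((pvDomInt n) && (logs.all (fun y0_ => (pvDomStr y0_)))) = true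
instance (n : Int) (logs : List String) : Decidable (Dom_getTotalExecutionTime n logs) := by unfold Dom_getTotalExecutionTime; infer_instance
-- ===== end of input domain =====

-- B replaces A's stack simulation (which charges the running function segment by segment
-- and re-writes the stored timestamp of the stack top on every event) by recursive descent
-- over the nested call structure: each balanced block reports its inclusive duration, and a
-- function's exclusive time is charged once, as inclusive minus the children's inclusive
-- durations (objective: alternative).

-- shared by both ports: both Pythons compute `log.split(":")` and read fields 0/1/2, with
-- int() on fields 0 and 2 (totalised with defaults; exact under Pre_, which demands ≥ 3
-- fields and parsable ints — Python raises otherwise).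
def pvParseLog (log : String) : Int × String × Int :=
  let parts := (PySem.Str.split? log ":").getD []  -- sep ":" ≠ "": split? is always `some`
  ((PySem.Int.ofStr? (parts.getD 0 "")).getD 0,
   parts.getD 1 "",
   (PySem.Int.ofStr? (parts.getD 2 "")).getD 0)

-- Python's `execution_times[fid] += amt` (negative fid wraps; exact under Pre_'s range bound)
def pvCharge (et : List Int) (fid amt : Int) : List Int :=
  PySem.List.pySetD et fid (PySem.List.pyGetD et fid 0 + amt)

-- ===== PORT A =====
-- A's loop body after `log = logs[i].split(":")`, on the parsed triple
def getTotalExecutionTimeStep (st : List Int × List (Int × Int)) (e : Int × String × Int) :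
    List Int × List (Int × Int) :=
  let function_id := e.1
  let action := e.2.1
  let timestamp := e.2.2
  let et := st.1
  let stack := st.2
  if action == "start" then
    match stack.getLast? with
    | some last => (pvCharge et last.1 (timestamp - last.2), stack ++ [(function_id, timestamp)])
    | none => (et, stack ++ [(function_id, timestamp)])
  else
    match stack.getLast? with
    | none => (et, stack)  -- Python: stack.pop() raises IndexError; excluded by Pre_
    | some last =>
      let et' := pvCharge et last.1 (timestamp - last.2 + 1)
      let stack' := stack.dropLast
      match stack'.getLast? with
      | some top => (et', stack'.dropLast ++ [(top.1, timestamp + 1)])  -- stack[-1] = (…, t+1)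
      | none => (et', stack')

def getTotalExecutionTime (n : Int) (logs : List String) : List Int :=
  (logs.foldl (fun st log => getTotalExecutionTimeStep st (pvParseLog log))
    (List.replicate n.toNat 0, [])).1

-- ===== PORT B =====
-- B's inner `while events[i][1] == "start"` loop of block(i), fused with the tail of block:
-- arguments are the opened function `f`, its start time `t0`, the children-inclusive
-- accumulator, the remaining events and the times list; returns the updated times list, the
-- events after this block's end, and the block's inclusive duration. `none` models the
-- IndexError Python B raises when an end event is missing (fuel never runs out under Pre_,
-- where logs.length + 1 calls suffice).
def pvKidsF : Nat → Int → Int → Int → List (Int × String × Int) → List Int →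
    Option (List Int × List (Int × String × Int) × Int)
  | 0, _, _, _, _, _ => none
  | fuel + 1, f, t0, kids, evs, et =>
    match evs with
    | [] => none  -- events[i] raises IndexError in Python B
    | (g, act, t1) :: rest =>
      if act == "start" then
        match pvKidsF fuel g t1 0 rest et with  -- recursive call block(i)
        | none => none
        | some (et', rest', inc) => pvKidsF fuel f t0 (kids + inc) rest' et'
      else  -- the matching end: charge f once with inclusive − children
        some (pvCharge et f (t1 - t0 + 1 - kids), rest, t1 - t0 + 1)

-- the top-level `while i < len(events)` loop: one block(i) per iteration
def pvTopF : Nat → List (Int × String × Int) → List Int → Option (List Int)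
  | 0, _, _ => none
  | _ + 1, [], et => some et
  | fuel + 1, (f, _, t0) :: rest, et =>
    match pvKidsF fuel f t0 0 rest et with
    | none => none
    | some (et', rest', _) => pvTopF fuel rest' et'

def getTotalExecutionTime_alt (n : Int) (logs : List String) : List Int :=
  (pvTopF (logs.length + 1) (logs.map pvParseLog) (List.replicate n.toNat 0)).getD []

-- ===== PRECONDITION & SPEC =====
def pvIsStart (log : String) : Bool := (pvParseLog log).2.1 == "start"

def pvOkLog (n : Int) (log : String) : Bool :=
  let parts := (PySem.Str.split? log ":").getD []  -- sep ":" ≠ "": split? is always `some`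
  decide (3 ≤ parts.length) &&
  (PySem.Int.ofStr? (parts.getD 0 "")).isSome &&
  (PySem.Int.ofStr? (parts.getD 2 "")).isSome &&
  decide (-n ≤ (pvParseLog log).1 ∧ (pvParseLog log).1 < n)

-- Pre_ excludes the inputs on which A raises — a log with fewer than 3 ':'-fields or an
-- unparsable int field (IndexError/ValueError), a prefix with more end than start events
-- (pop from an empty stack), a charged id outside [-n, n) (IndexError) — and, in addition,
-- logs with an unmatched start event (an incomplete log, outside the task's balanced-log
-- domain): there A returns a partial tally for the still-open frames while the recursive B,
-- which needs each call's end event, raises IndexError (see the cite in the claim).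
-- Stated narrowing: the id range is required for EVERY log, though the id of an end event
-- is parsed but never used as an index.
def Pre_getTotalExecutionTime (n : Int) (logs : List String) : Prop :=
  (∀ l ∈ logs, pvOkLog n l = true) ∧
  (∀ k ∈ List.range (logs.length + 1),
    (logs.take k).countP (fun l => !pvIsStart l) ≤ (logs.take k).countP pvIsStart) ∧
  logs.countP (fun l => !pvIsStart l) = logs.countP pvIsStart
instance (n : Int) (logs : List String) : Decidable (Pre_getTotalExecutionTime n logs) := by
  unfold Pre_getTotalExecutionTime; infer_instance

def pvWitness_getTotalExecutionTime : Int × List String :=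
  (2, ["0:start:0", "1:start:2", "1:end:5", "0:end:6"])

def Spec_getTotalExecutionTime (n : Int) (logs : List String) (out : List Int) : Prop := out = getTotalExecutionTime_alt n logs
instance (n : Int) (logs : List String) (out : List Int) : Decidable (Spec_getTotalExecutionTime n logs out) := by unfold Spec_getTotalExecutionTime; infer_instance

-- ===== CLAIM (what is proved, stated in full; the proofs are below) =====
def Claim_equal_getTotalExecutionTime : Prop := ∀ (n : Int) (logs : List String), Dom_getTotalExecutionTime n logs → Pre_getTotalExecutionTime n logs → Spec_getTotalExecutionTime n logs (getTotalExecutionTime n logs)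

-- ===== LEMMAS AND PROOFS =====

-- the parsed-events versions of the Pre_ predicates
def pvIsStartE (e : Int × String × Int) : Bool := e.2.1 == "start"

-- a list of deferred charges, applied left to right
def pvApplyC (et : List Int) (cs : List (Int × Int)) : List Int :=
  cs.foldl (fun e c => pvCharge e c.1 c.2) et

-- A's `stack[-1] = (stack[-1][0], v)` on s (empty s untouched, as in A's `if stack:`)
def pvSetTop (s : List (Int × Int)) (v : Int) : List (Int × Int) :=
  match s.getLast? with
  | none => []
  | some top => s.dropLast ++ [(top.1, v)]

lemma pvCharge_resolve (et : List Int) (f a : Int) :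
    pvCharge et f a = match PySem.List.pyIdx? et.length f with
      | none => et
      | some k => et.set k (et.getD k 0 + a) := by
  unfold pvCharge PySem.List.pySetD PySem.List.pySet? PySem.List.pyGetD PySem.List.pyGet?
  cases h : PySem.List.pyIdx? et.length f with
  | none => simp [h]
  | some k =>
    have hk : k < et.length := by
      unfold PySem.List.pyIdx? at h; split_ifs at h <;> simp_all <;> omega
    simp [h, List.getD, List.getElem?_eq_getElem hk]

lemma pvIdx_lt {m : Nat} {f : Int} {k : Nat} (h : PySem.List.pyIdx? m f = some k) : k < m := by
  unfold PySem.List.pyIdx? at h; split_ifs at h <;> simp_all <;> omega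

lemma pvCharge_length (et : List Int) (f a : Int) : (pvCharge et f a).length = et.length := by
  rw [pvCharge_resolve]; cases h : PySem.List.pyIdx? et.length f <;> simp

lemma pvCharge_zero (et : List Int) (f : Int) : pvCharge et f 0 = et := by
  rw [pvCharge_resolve]
  cases h : PySem.List.pyIdx? et.length f with
  | none => rfl
  | some k =>
    have hk := pvIdx_lt h
    simp [List.getD, List.getElem?_eq_getElem hk, List.set_getElem_self]

lemma pvGetD_set_self (l : List Int) (k : Nat) (v : Int) (h : k < l.length) :
    (l.set k v).getD k 0 = v := by
  simp [List.getD, List.getElem?_set_self h]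

lemma pvGetD_set_ne (l : List Int) (k j : Nat) (v : Int) (h : k ≠ j) :
    (l.set k v).getD j 0 = l.getD j 0 := by
  simp [List.getD, List.getElem?_set_ne h]

lemma pvCharge_eq_set (et : List Int) (f a : Int) (k : Nat)
    (h : PySem.List.pyIdx? et.length f = some k) :
    pvCharge et f a = et.set k (et.getD k 0 + a) := by
  rw [pvCharge_resolve, h]

lemma pvCharge_eq_self (et : List Int) (f a : Int)
    (h : PySem.List.pyIdx? et.length f = none) : pvCharge et f a = et := by
  rw [pvCharge_resolve, h]

lemma pvCharge_add (et : List Int) (f a b : Int) :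
    pvCharge (pvCharge et f a) f b = pvCharge et f (a + b) := by
  cases h : PySem.List.pyIdx? et.length f with
  | none => rw [pvCharge_eq_self _ _ _ h, pvCharge_eq_self _ _ _ h, pvCharge_eq_self _ _ _ h]
  | some k =>
    have hk := pvIdx_lt h
    have h' : PySem.List.pyIdx? (pvCharge et f a).length f = some k := by
      rw [pvCharge_length]; exact h
    rw [pvCharge_eq_set _ _ b _ h', pvCharge_eq_set _ _ a _ h, pvCharge_eq_set _ _ (a+b) _ h,
      pvGetD_set_self _ _ _ hk, List.set_set]
    congr 1
    ring

lemma pvCharge_comm (et : List Int) (f a g b : Int) :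
    pvCharge (pvCharge et f a) g b = pvCharge (pvCharge et g b) f a := by
  cases hf : PySem.List.pyIdx? et.length f with
  | none =>
    have hf' : PySem.List.pyIdx? (pvCharge et g b).length f = none := by
      rw [pvCharge_length]; exact hf
    rw [pvCharge_eq_self _ _ _ hf, pvCharge_eq_self _ _ _ hf']
  | some k =>
    have hk := pvIdx_lt hf
    have hf' : PySem.List.pyIdx? (pvCharge et g b).length f = some k := by
      rw [pvCharge_length]; exact hf
    cases hg : PySem.List.pyIdx? et.length g with
    | none =>
      have hg' : PySem.List.pyIdx? (pvCharge et f a).length g = none := by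
        rw [pvCharge_length]; exact hg
      rw [pvCharge_eq_self _ _ _ hg, pvCharge_eq_self _ _ _ hg']
    | some l =>
      have hl := pvIdx_lt hg
      have hg' : PySem.List.pyIdx? (pvCharge et f a).length g = some l := by
        rw [pvCharge_length]; exact hg
      rw [pvCharge_eq_set _ _ b _ hg', pvCharge_eq_set _ _ a _ hf,
        pvCharge_eq_set _ _ a _ hf', pvCharge_eq_set _ _ b _ hg]
      by_cases hkl : k = l
      · subst hkl
        rw [List.set_set, List.set_set, pvGetD_set_self _ _ _ hk, pvGetD_set_self _ _ _ hk]
        congr 1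
        ring
      · rw [pvGetD_set_ne _ _ _ _ hkl, pvGetD_set_ne _ _ _ _ (Ne.symm hkl),
          List.set_comm _ _ hkl]

lemma pvApplyC_charge (et : List Int) (cs : List (Int × Int)) (f a : Int) :
    pvApplyC (pvCharge et f a) cs = pvCharge (pvApplyC et cs) f a := by
  induction cs generalizing et with
  | nil => rfl
  | cons c rest ih =>
    show pvApplyC (pvCharge (pvCharge et f a) c.1 c.2) rest = _
    rw [pvCharge_comm et f a c.1 c.2]
    exact ih (pvCharge et c.1 c.2)

-- MAIN LEMMA: a successful pvKidsF run consumes one balanced-plus-end prefix `pre`, and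
-- A's fold over `pre` — started from B's times shifted by the segment charge A has already
-- applied to the open frame f (arbitrary further deferred charges cs commute past it) —
-- lands on B's resulting times, popping f and re-stamping the caller's frame.
lemma pvKids_agree (m : Nat) : ∀ evs : List (Int × String × Int), evs.length ≤ m →
    ∀ fuel f t0 kids et et' rest inc,
    pvKidsF fuel f t0 kids evs et = some (et', rest, inc) →
    ∃ pre, evs = pre ++ rest ∧ pre ≠ [] ∧
      pre.countP (fun e => !pvIsStartE e) = pre.countP pvIsStartE + 1 ∧
      (∀ j < pre.length, (pre.take j).countP (fun e => !pvIsStartE e) ≤ (pre.take j).countP pvIsStartE) ∧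
      ∀ cs s q,
        List.foldl getTotalExecutionTimeStep
          (pvCharge (pvApplyC et cs) f (q - t0 - kids), s ++ [(f, q)]) pre
        = (pvApplyC et' cs, pvSetTop s (t0 + inc)) := by
  induction m with
  | zero =>
    intro evs hlen fuel f t0 kids et et' rest inc h
    interval_cases hl : evs.length
    · rw [List.length_eq_zero_iff.mp hl] at h
      cases fuel <;> simp [pvKidsF] at h
  | succ m ih =>
    intro evs hlen fuel f t0 kids et et' rest inc h
    match fuel, evs with
    | 0, _ => simp [pvKidsF] at h
    | fuel + 1, [] => simp [pvKidsF] at h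
    | fuel + 1, (g, act, t1) :: rest0 =>
      by_cases hs : (act == "start") = true
      · -- a child block: recurse, then continue the while loop
        simp only [pvKidsF, hs, if_true] at h
        rcases h1 : pvKidsF fuel g t1 0 rest0 et with _ | ⟨⟨et1, rest1, inc1⟩⟩
        · rw [h1] at h; simp at h
        rw [h1] at h; simp only at h
        obtain ⟨pre1, hsplit1, hne1, hcnt1, hpref1, hfold1⟩ :=
          ih rest0 (by simp only [List.length_cons] at hlen; omega) fuel g t1 0 et et1 rest1 inc1 h1
        have hlen1 : rest1.length < rest0.length := by
          rw [hsplit1, List.length_append]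
          cases pre1 with
          | nil => exact absurd rfl hne1
          | cons a l => simp only [List.length_cons]; omega
        obtain ⟨pre2, hsplit2, hne2, hcnt2, hpref2, hfold2⟩ :=
          ih rest1 (by simp only [List.length_cons] at hlen; omega) fuel f t0 (kids + inc1) et1 et' rest inc h
        refine ⟨(g, act, t1) :: pre1 ++ pre2, by simp [hsplit1, hsplit2], by simp, ?_, ?_, ?_⟩
        · have hstart : pvIsStartE (g, act, t1) = true := hs
          simp [List.countP_cons, List.countP_append, hstart, hcnt1, hcnt2] <;> omega
        · intro j hj
          match j with
          | 0 => simp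
          | j + 1 =>
            have hstart : pvIsStartE (g, act, t1) = true := hs
            simp only [List.cons_append, List.take_succ_cons, List.countP_cons]
            by_cases hj1 : j ≤ pre1.length
            · rw [List.take_append_of_le_length hj1]
              have := hcnt1  -- full-pre1 count, used when j = pre1.length
              have hb : (pre1.take j).countP (fun e => !pvIsStartE e) ≤ (pre1.take j).countP pvIsStartE + 1 := by
                rcases lt_or_eq_of_le hj1 with hlt | heq
                · exact le_trans (hpref1 j hlt) (by omega)
                · rw [heq, List.take_length]; omega
              simp [hstart] <;> omega
            · have hj2 : j - pre1.length < pre2.length := by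
                simp only [List.length_cons, List.length_append] at hj; omega
              rw [show j = pre1.length + (j - pre1.length) by omega,
                List.take_length_add_append, List.countP_append, List.countP_append]
              have := hpref2 (j - pre1.length) hj2
              simp [hstart, hcnt1] <;> omega
        · intro cs s q
          rw [List.foldl_append, List.foldl_cons]
          have hstep : getTotalExecutionTimeStep
              (pvCharge (pvApplyC et cs) f (q - t0 - kids), s ++ [(f, q)]) (g, act, t1)
              = (pvCharge (pvApplyC et cs) f (t1 - t0 - kids), (s ++ [(f, q)]) ++ [(g, t1)]) := by
            simp only [getTotalExecutionTimeStep, hs, if_true, List.getLast?_concat]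
            rw [pvCharge_add]
            ring_nf
          rw [hstep]
          have h1' := hfold1 (cs ++ [(f, t1 - t0 - kids)]) (s ++ [(f, q)]) t1
          have heq1 : pvCharge (pvApplyC et (cs ++ [(f, t1 - t0 - kids)])) g (t1 - t1 - 0)
              = pvCharge (pvApplyC et cs) f (t1 - t0 - kids) := by
            simp only [pvApplyC, List.foldl_append, List.foldl_cons, List.foldl_nil]
            rw [show t1 - t1 - 0 = 0 by ring, pvCharge_zero] <;> rfl
          rw [heq1] at h1'
          rw [h1']
          have hsettop : pvSetTop (s ++ [(f, q)]) (t1 + inc1) = s ++ [(f, t1 + inc1)] := by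
            simp [pvSetTop, List.getLast?_concat]
          rw [hsettop]
          have h2' := hfold2 cs s (t1 + inc1)
          have heq2 : pvCharge (pvApplyC et1 cs) f (t1 + inc1 - t0 - (kids + inc1))
              = pvApplyC et1 (cs ++ [(f, t1 - t0 - kids)]) := by
            simp only [pvApplyC, List.foldl_append, List.foldl_cons, List.foldl_nil]
            rw [show t1 + inc1 - t0 - (kids + inc1) = t1 - t0 - kids by ring] <;> rfl
          rw [heq2] at h2'
          exact h2'
      · -- the matching end event
        simp only [pvKidsF] at h
        rw [if_neg hs] at h
        rw [Option.some_inj] at h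
        have het : pvCharge et f (t1 - t0 + 1 - kids) = et' := congrArg Prod.fst h
        have hrest : rest0 = rest := congrArg (fun p => p.2.1) h
        have hinc : t1 - t0 + 1 = inc := congrArg (fun p => p.2.2) h
        refine ⟨[(g, act, t1)], by simp [hrest], by simp, by simp [pvIsStartE, hs], ?_, ?_⟩
        · intro j hj
          have hj0 : j = 0 := by simpa using hj
          subst hj0; simp
        · intro cs s q
          have hs' : (act == "start") = false := by simpa using hs
          simp only [List.foldl_cons, List.foldl_nil, getTotalExecutionTimeStep, hs',
            Bool.false_eq_true, if_false, List.getLast?_concat, List.dropLast_concat]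
          rw [pvCharge_add, ← het, pvApplyC_charge]
          cases hsl : s.getLast? with
          | none =>
            simp only [Prod.mk.injEq, pvSetTop, hsl]
            exact ⟨by congr 1; ring, List.getLast?_eq_none_iff.mp hsl⟩
          | some top =>
            simp only [Prod.mk.injEq, pvSetTop, hsl]
            refine ⟨by congr 1; ring, ?_⟩
            have ht : t0 + inc = t1 + 1 := by omega
            rw [ht]

-- success of pvKidsF: an excess-end prefix exists and fuel covers the list
lemma pvKids_some (m : Nat) : ∀ evs : List (Int × String × Int), evs.length ≤ m →
    ∀ fuel f t0 kids et, evs.length + 1 ≤ fuel →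
    (∃ k ≤ evs.length, (evs.take k).countP pvIsStartE + 1 ≤ (evs.take k).countP (fun e => !pvIsStartE e)) →
    ∃ r, pvKidsF fuel f t0 kids evs et = some r := by
  induction m with
  | zero =>
    intro evs hlen fuel f t0 kids et hfuel ⟨k, hk, hcnt⟩
    have hnil : evs = [] := List.length_eq_zero_iff.mp (by omega)
    subst hnil
    have hk0 : k = 0 := by simpa using hk
    subst hk0
    simp at hcnt
  | succ m ih =>
    intro evs hlen fuel f t0 kids et hfuel ⟨k, hk, hcnt⟩
    match fuel, evs with
    | fuel + 1, [] =>
      have hk0 : k = 0 := by simpa using hk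
      subst hk0
      simp at hcnt
    | fuel + 1, (g, act, t1) :: rest0 =>
      by_cases hs : (act == "start") = true
      · -- need the child to succeed, and then the continuation
        have hstart : pvIsStartE (g, act, t1) = true := hs
        have hk0 : k ≠ 0 := by rintro rfl; simp at hcnt
        have hrest : ∃ k' ≤ rest0.length, (rest0.take k').countP pvIsStartE + 2 ≤ (rest0.take k').countP (fun e => !pvIsStartE e) := by
          rcases Nat.exists_eq_succ_of_ne_zero hk0 with ⟨k', rfl⟩
          refine ⟨k', by simp only [List.length_cons] at hk; omega, ?_⟩
          rw [List.take_succ_cons, List.countP_cons, List.countP_cons] at hcnt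
          simp only [hstart, Bool.not_true] at hcnt
          simp at hcnt
          omega
        obtain ⟨k', hk', hcnt'⟩ := hrest
        obtain ⟨⟨et1, rest1, inc1⟩, h1⟩ := ih rest0 (by simp only [List.length_cons] at hlen; omega) fuel g t1 0 et
          (by simp only [List.length_cons] at hlen hfuel; omega) ⟨k', hk', by omega⟩
        obtain ⟨pre1, hsplit1, hne1, hcnt1, hpref1, _⟩ :=
          pvKids_agree rest0.length rest0 le_rfl fuel g t1 0 et et1 rest1 inc1 h1
        have hlen1 : rest1.length + 1 ≤ rest0.length := by
          rw [hsplit1, List.length_append]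
          cases pre1 with
          | nil => exact absurd rfl hne1
          | cons a l => simp only [List.length_cons]; omega
        -- excess-end prefix for the continuation: from the depth-2 witness k'
        have hrest1 : ∃ k2 ≤ rest1.length, (rest1.take k2).countP pvIsStartE + 1 ≤ (rest1.take k2).countP (fun e => !pvIsStartE e) := by
          by_cases hk'p : k' ≤ pre1.length
          · -- witness would lie inside pre1, impossible: pre1 prefixes have ends ≤ starts + 1
            exfalso
            have hb : (pre1.take k').countP (fun e => !pvIsStartE e) ≤ (pre1.take k').countP pvIsStartE + 1 := by
              rcases lt_or_eq_of_le hk'p with hlt | heq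
              · exact le_trans (hpref1 k' hlt) (by omega)
              · rw [heq, List.take_length]; omega
            rw [hsplit1, List.take_append_of_le_length hk'p] at hcnt'
            omega
          · refine ⟨k' - pre1.length, ?_, ?_⟩
            · rw [hsplit1, List.length_append] at hk'; omega
            · rw [hsplit1, show k' = pre1.length + (k' - pre1.length) by omega,
                List.take_length_add_append, List.countP_append, List.countP_append] at hcnt'
              omega
        obtain ⟨r, hr⟩ := ih rest1 (by simp only [List.length_cons] at hlen; omega) fuel f t0
          (kids + inc1) et1 (by simp only [List.length_cons] at hfuel; omega) hrest1
        exact ⟨r, by simp only [pvKidsF, hs, if_true, h1]; exact hr⟩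
      · exact ⟨_, by simp only [pvKidsF]; rw [if_neg hs]⟩

-- the top-level loop: under a balanced prefix condition it succeeds and agrees with A's fold
lemma pvTop_agree : ∀ fuel (evs : List (Int × String × Int)) et, evs.length + 1 ≤ fuel →
    (∀ k ≤ evs.length, (evs.take k).countP (fun e => !pvIsStartE e) ≤ (evs.take k).countP pvIsStartE) →
    evs.countP (fun e => !pvIsStartE e) = evs.countP pvIsStartE →
    ∃ et', pvTopF fuel evs et = some et' ∧
      List.foldl getTotalExecutionTimeStep (et, []) evs = (et', []) := by
  intro fuel
  induction fuel with
  | zero => intro evs et hf; omega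
  | succ fuel ih =>
    intro evs et hf hpref hbal
    match evs with
    | [] => exact ⟨et, rfl, rfl⟩
    | (g, act, t1) :: rest0 =>
      -- the head must be a start event: take-1 prefix
      have hstart : pvIsStartE (g, act, t1) = true := by
        have := hpref 1 (by simp)
        simp only [List.take_succ_cons, List.take_zero, List.countP_cons, List.countP_nil] at this
        by_contra hc
        simp [hc] at this
      have hs : (act == "start") = true := hstart
      -- the block finds its end: the whole rest0 has one excess end
      have hbal0 : rest0.countP pvIsStartE + 1 = rest0.countP (fun e => !pvIsStartE e) := by
        simp only [List.countP_cons, hstart] at hbal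
        simp at hbal ⊢; omega
      obtain ⟨⟨et1, rest1, inc1⟩, h1⟩ := pvKids_some rest0.length rest0 le_rfl fuel g t1 0 et
        (by simp only [List.length_cons] at hf; omega) ⟨rest0.length, le_rfl, by rw [List.take_length]; omega⟩
      obtain ⟨pre1, hsplit1, hne1, hcnt1, _, hfold1⟩ :=
        pvKids_agree rest0.length rest0 le_rfl fuel g t1 0 et et1 rest1 inc1 h1
      have hlen1 : rest1.length + 1 ≤ rest0.length := by
        rw [hsplit1, List.length_append]
        cases pre1 with
        | nil => exact absurd rfl hne1
        | cons a l => simp only [List.length_cons]; omega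
      -- prefix and balance conditions for the remainder
      have hconsumed : ((g, act, t1) :: pre1).countP (fun e => !pvIsStartE e)
          = ((g, act, t1) :: pre1).countP pvIsStartE := by
        simp [hstart, hcnt1]
      have hsplit0 : (g, act, t1) :: rest0 = ((g, act, t1) :: pre1) ++ rest1 := by
        simp [hsplit1]
      have hpref' : ∀ k ≤ rest1.length,
          (rest1.take k).countP (fun e => !pvIsStartE e) ≤ (rest1.take k).countP pvIsStartE := by
        intro k hk
        have := hpref (((g, act, t1) :: pre1).length + k)
          (by rw [hsplit0]; simp; omega)
        rw [hsplit0, List.take_length_add_append, List.countP_append, List.countP_append,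
          List.countP_cons, List.countP_cons] at this
        simp [hstart, hcnt1] at this
        omega
      have hbal' : rest1.countP (fun e => !pvIsStartE e) = rest1.countP pvIsStartE := by
        have := hbal
        rw [hsplit0, List.countP_append, List.countP_append, List.countP_cons, List.countP_cons] at this
        simp [hstart, hcnt1] at this
        omega
      obtain ⟨et', h2, hfold2⟩ := ih rest1 et1 (by simp only [List.length_cons] at hf; omega) hpref' hbal'
      refine ⟨et', ?_, ?_⟩
      · simp only [pvTopF, h1]
        exact h2
      · rw [List.foldl_cons]
        have hstep : getTotalExecutionTimeStep (et, []) (g, act, t1) = (et, [(g, t1)]) := by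
          simp [getTotalExecutionTimeStep, hs]
        rw [hstep, hsplit1, List.foldl_append]
        have h1' := hfold1 [] [] t1
        have : pvCharge (pvApplyC et []) g (t1 - t1 - 0) = et := by
          rw [show t1 - t1 - 0 = 0 by ring, pvCharge_zero] <;> rfl
        rw [this] at h1'
        simp only [List.nil_append] at h1'
        rw [h1']
        simpa [pvApplyC, pvSetTop] using hfold2

-- ===== VERDICT (by name: the statement is the Claim_ definition above) =====
theorem getTotalExecutionTime_spec : Claim_equal_getTotalExecutionTime := by
  intro n logs _ hpre
  unfold Spec_getTotalExecutionTime getTotalExecutionTime getTotalExecutionTime_alt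
  obtain ⟨_, hpref, hbal⟩ := hpre
  have hmap : ∀ (p : (Int × String × Int) → Bool) (xs : List String) ,
      (xs.map pvParseLog).countP p = xs.countP (fun l => p (pvParseLog l)) := by
    intro p xs; rw [List.countP_map]; rfl
  obtain ⟨et', hsome, hfold⟩ := pvTop_agree (logs.length + 1) (logs.map pvParseLog)
    (List.replicate n.toNat 0) (by simp)
    (by
      intro k hk
      rw [← List.map_take, hmap, hmap]
      exact hpref k (by simp at hk ⊢; omega))
    (by rw [hmap, hmap]; exact hbal)
  rw [← List.foldl_map, hfold, hsome]
  rfl
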